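-- pv_equiv track=rewrite | github.com/macdroid53/PaltoSC | CVS2XML.py | sort_controls
-- ===== SOURCE A (Python) =====
-- def sort_controls(control_str=''):
--     control_list = control_str.split(',')
--     chlist = []
--     auxlist = []
--     buslist = []
--     mainlist = []
--     for control in control_list:
--         if 'bus' in control:
--             buslist.append(control)
--         elif 'aux' in control:
--             auxlist.append(control)
--         elif 'main' in control:
--             mainlist.append(control)
--         elif 'ch' in control:
--             chlist.append(control)
--     buslist = sorted(buslist)
--     auxlist = sorted(auxlist)
--     mainlist = sorted(mainlist)
--     chlist = sorted(chlist)
--     sorted_controls = chlist + auxlist + buslist + mainlist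
--     return sorted_controls
-- ===== SOURCE B (Python) =====
-- def sort_controls(control_str=''):
--     def rank(c):
--         if 'bus' in c:
--             return 2
--         if 'aux' in c:
--             return 1
--         if 'main' in c:
--             return 3
--         if 'ch' in c:
--             return 0
--         return -1
--     items = [c for c in control_str.split(',') if rank(c) >= 0]
--     return sorted(items, key=lambda c: (rank(c), c))
-- ===== Notes on version B (the rewrite author's own statement) =====
-- stated objective: simpler
-- what changed: Replaces the four accumulator lists, four separate sorts and a concatenation with a single rank helper, one filter and one keyed sort on (rank, string).
import Mathlib
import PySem

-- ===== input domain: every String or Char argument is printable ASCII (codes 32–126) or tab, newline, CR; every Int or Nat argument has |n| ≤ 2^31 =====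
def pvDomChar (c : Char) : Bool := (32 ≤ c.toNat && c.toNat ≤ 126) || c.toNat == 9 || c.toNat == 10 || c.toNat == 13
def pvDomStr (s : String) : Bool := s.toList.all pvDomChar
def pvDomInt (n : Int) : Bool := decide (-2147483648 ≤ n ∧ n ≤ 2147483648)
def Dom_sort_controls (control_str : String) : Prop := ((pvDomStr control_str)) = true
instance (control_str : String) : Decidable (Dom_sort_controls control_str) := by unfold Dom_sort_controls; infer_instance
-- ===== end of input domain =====

-- B replaces A's four bucket lists, four separate sorts and a concatenation by one rank
-- helper, one filter and a single keyed sort on (rank, string) — simpler, same cost.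

-- ===== PORT A =====
def sortControlsStep (acc : List String × List String × List String × List String)
    (control : String) : List String × List String × List String × List String :=
  if PySem.Str.isIn "bus" control then (acc.1, acc.2.1, acc.2.2.1 ++ [control], acc.2.2.2)
  else if PySem.Str.isIn "aux" control then (acc.1, acc.2.1 ++ [control], acc.2.2.1, acc.2.2.2)
  else if PySem.Str.isIn "main" control then (acc.1, acc.2.1, acc.2.2.1, acc.2.2.2 ++ [control])
  else if PySem.Str.isIn "ch" control then (acc.1 ++ [control], acc.2.1, acc.2.2.1, acc.2.2.2)
  else acc

def sort_controls (control_str : String) : List String :=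
  let control_list := (PySem.Str.split? control_str ",").getD []   -- sep "," ≠ "", so split? is some
  let st := control_list.foldl sortControlsStep ([], [], [], [])
  let buslist := PySem.List.sorted st.2.2.1 (fun x => x)
  let auxlist := PySem.List.sorted st.2.1 (fun x => x)
  let mainlist := PySem.List.sorted st.2.2.2 (fun x => x)
  let chlist := PySem.List.sorted st.1 (fun x => x)
  chlist ++ auxlist ++ buslist ++ mainlist

-- ===== PORT B =====
def sortRank (c : String) : Int :=
  if PySem.Str.isIn "bus" c then 2
  else if PySem.Str.isIn "aux" c then 1
  else if PySem.Str.isIn "main" c then 3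
  else if PySem.Str.isIn "ch" c then 0
  else -1

def sort_controls_alt (control_str : String) : List String :=
  let items := ((PySem.Str.split? control_str ",").getD []).filter (fun c => decide (0 ≤ sortRank c))
  PySem.List.sorted2 items sortRank (fun c => c)

-- ===== PRECONDITION & SPEC =====
def Spec_sort_controls (control_str : String) (out : List String) : Prop := out = sort_controls_alt control_str
instance (control_str : String) (out : List String) : Decidable (Spec_sort_controls control_str out) := by unfold Spec_sort_controls; infer_instance

-- ===== CLAIM (what is proved, stated in full; the proofs are below) =====
def Claim_equal_sort_controls : Prop := ∀ (control_str : String), Dom_sort_controls control_str → Spec_sort_controls control_str (sort_controls control_str)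

-- ===== LEMMAS AND PROOFS =====

-- the combined (rank, string) key, a linear order; injective via its second component
def sortKey (c : String) : Lex (Int × String) := toLex (sortRank c, c)

theorem sortKey_injective : Function.Injective sortKey := by
  intro a b h
  have := congrArg (fun x => (ofLex x).2) h
  simpa [sortKey] using this

theorem rank_cases (c : String) :
    sortRank c = -1 ∨ sortRank c = 0 ∨ sortRank c = 1 ∨ sortRank c = 2 ∨ sortRank c = 3 := by
  unfold sortRank; split_ifs <;> simp

-- A's fold fills the four buckets with the rank-0/1/2/3 filters, in order
theorem foldl_buckets (l : List String) (ch aux bus mn : List String) :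
    l.foldl sortControlsStep (ch, aux, bus, mn) =
      (ch ++ l.filter (fun c => decide (sortRank c = 0)),
       aux ++ l.filter (fun c => decide (sortRank c = 1)),
       bus ++ l.filter (fun c => decide (sortRank c = 2)),
       mn ++ l.filter (fun c => decide (sortRank c = 3))) := by
  induction l generalizing ch aux bus mn with
  | nil => simp
  | cons a l ih =>
    simp only [List.foldl_cons, List.filter_cons]
    by_cases h1 : PySem.Str.isIn "bus" a = true
    · have hs : sortControlsStep (ch, aux, bus, mn) a = (ch, aux, bus ++ [a], mn) := by
        simp only [sortControlsStep, h1, if_true]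
      have hr : sortRank a = 2 := by simp only [sortRank, h1, if_true]
      rw [hs, ih]; simp [hr]
    · by_cases h2 : PySem.Str.isIn "aux" a = true
      · have hs : sortControlsStep (ch, aux, bus, mn) a = (ch, aux ++ [a], bus, mn) := by
          simp only [sortControlsStep, h1, h2, if_true, if_false, Bool.false_eq_true]
        have hr : sortRank a = 1 := by simp only [sortRank, h1, h2, if_true, if_false, Bool.false_eq_true]
        rw [hs, ih]; simp [hr]
      · by_cases h3 : PySem.Str.isIn "main" a = true
        · have hs : sortControlsStep (ch, aux, bus, mn) a = (ch, aux, bus, mn ++ [a]) := by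
            simp only [sortControlsStep, h1, h2, h3, if_true, if_false, Bool.false_eq_true]
          have hr : sortRank a = 3 := by simp only [sortRank, h1, h2, h3, if_true, if_false, Bool.false_eq_true]
          rw [hs, ih]; simp [hr]
        · by_cases h4 : PySem.Str.isIn "ch" a = true
          · have hs : sortControlsStep (ch, aux, bus, mn) a = (ch ++ [a], aux, bus, mn) := by
              simp only [sortControlsStep, h1, h2, h3, h4, if_true, if_false, Bool.false_eq_true]
            have hr : sortRank a = 0 := by simp only [sortRank, h1, h2, h3, h4, if_true, if_false, Bool.false_eq_true]
            rw [hs, ih]; simp [hr]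
          · have hs : sortControlsStep (ch, aux, bus, mn) a = (ch, aux, bus, mn) := by
              simp only [sortControlsStep, h1, h2, h3, h4, if_false, Bool.false_eq_true]
            have hr : sortRank a = -1 := by simp only [sortRank, h1, h2, h3, h4, if_false, Bool.false_eq_true]
            rw [hs, ih]; simp [hr]

-- B's two-key sort is the one-key sort by the lexicographic sortKey
theorem before_eq (a b : String) :
    (decide (sortRank a < sortRank b) || (!decide (sortRank b < sortRank a) && decide (a < b)))
      = decide (sortKey a < sortKey b) := by
  by_cases h1 : sortRank a < sortRank b
  · simp [sortKey, Prod.Lex.lt_iff, h1]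
  · by_cases h2 : sortRank b < sortRank a
    · have hne : sortRank a ≠ sortRank b := by omega
      simp [sortKey, Prod.Lex.lt_iff, h1, h2, hne]
    · have he : sortRank a = sortRank b := by omega
      by_cases h3 : a < b <;> simp [sortKey, Prod.Lex.lt_iff, h3, he]

theorem sorted2_eq_sorted_key (xs : List String) :
    PySem.List.sorted2 xs sortRank (fun c => c) = PySem.List.sorted xs sortKey false := by
  rw [PySem.List.sorted_eq_foldl_insertBy]
  show List.foldl (fun acc x => PySem.List.insertBy
      (fun a b => decide (sortRank a < sortRank b) || (!decide (sortRank b < sortRank a) && decide (a < b)))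
      x acc) [] xs = _
  have hb : (fun a b : String => decide (sortRank a < sortRank b) || (!decide (sortRank b < sortRank a) && decide (a < b)))
      = (fun a b : String => decide (sortKey a < sortKey b)) := by
    funext a b; exact before_eq a b
  rw [hb]

-- moving one element out of a four-way concatenation (used by buckets_perm)
theorem perm4_1 {α : Type} (a : α) (x0 x1 x2 x3 q : List α)
    (ih : (x0 ++ x1 ++ x2 ++ x3).Perm q) :
    (x0 ++ (a :: (x1 ++ (x2 ++ x3)))).Perm (a :: q) := by
  have ih' : (x0 ++ (x1 ++ (x2 ++ x3))).Perm q := by simpa [List.append_assoc] using ih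
  exact List.perm_middle.trans (ih'.cons a)

theorem perm4_2 {α : Type} (a : α) (x0 x1 x2 x3 q : List α)
    (ih : (x0 ++ x1 ++ x2 ++ x3).Perm q) :
    (x0 ++ (x1 ++ (a :: (x2 ++ x3)))).Perm (a :: q) := by
  have ih' : ((x0 ++ x1) ++ (x2 ++ x3)).Perm q := by simpa [List.append_assoc] using ih
  have hm : ((x0 ++ x1) ++ (a :: (x2 ++ x3))).Perm (a :: ((x0 ++ x1) ++ (x2 ++ x3))) :=
    List.perm_middle
  have := hm.trans (ih'.cons a)
  simpa [List.append_assoc] using this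

theorem perm4_3 {α : Type} (a : α) (x0 x1 x2 x3 q : List α)
    (ih : (x0 ++ x1 ++ x2 ++ x3).Perm q) :
    (x0 ++ (x1 ++ (x2 ++ (a :: x3)))).Perm (a :: q) := by
  have hm : ((x0 ++ x1 ++ x2) ++ (a :: x3)).Perm (a :: ((x0 ++ x1 ++ x2) ++ x3)) :=
    List.perm_middle
  have := hm.trans (ih.cons a)
  simpa [List.append_assoc] using this

-- the four rank buckets, concatenated, are a permutation of B's filtered items
theorem buckets_perm (l : List String) :
    ((l.filter (fun c => decide (sortRank c = 0))) ++
     (l.filter (fun c => decide (sortRank c = 1))) ++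
     (l.filter (fun c => decide (sortRank c = 2))) ++
     (l.filter (fun c => decide (sortRank c = 3)))).Perm
      (l.filter (fun c => decide (0 ≤ sortRank c))) := by
  induction l with
  | nil => simp
  | cons a l ih =>
    simp only [List.filter_cons]
    rcases rank_cases a with h | h | h | h | h
    · simp only [h]; norm_num
      simpa [List.append_assoc] using ih
    · simp only [h]; norm_num
      simpa [List.append_assoc] using ih
    · simp only [h]; norm_num
      exact perm4_1 a _ _ _ _ _ ih
    · simp only [h]; norm_num
      exact perm4_2 a _ _ _ _ _ ih
    · simp only [h]; norm_num
      exact perm4_3 a _ _ _ _ _ ih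

-- members of a sorted rank-i bucket have rank i
theorem rank_of_mem_bucket (l : List String) (i : Int) (x : String)
    (hx : x ∈ PySem.List.sorted (l.filter (fun c => decide (sortRank c = i))) (fun y => y)) :
    sortRank x = i := by
  rw [PySem.List.mem_sorted] at hx
  exact of_decide_eq_true ((List.mem_filter.mp hx).2)

-- a sorted bucket is pairwise ≤ in the combined key
theorem bucket_pairwise (l : List String) (i : Int) :
    List.Pairwise (fun a b => sortKey a ≤ sortKey b)
      (PySem.List.sorted (l.filter (fun c => decide (sortRank c = i))) (fun y => y)) := by
  refine List.Pairwise.imp_of_mem ?_ (PySem.List.sorted_pairwise _ (fun y => y))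
  intro a b ha hb hab
  have hra := rank_of_mem_bucket l i a ha
  have hrb := rank_of_mem_bucket l i b hb
  rw [sortKey, sortKey, Prod.Lex.le_iff]
  exact Or.inr ⟨show sortRank a = sortRank b by rw [hra, hrb], hab⟩

theorem cross_key_le (l : List String) (i j : Int) (hij : i < j) (a b : String)
    (ha : a ∈ PySem.List.sorted (l.filter (fun c => decide (sortRank c = i))) (fun y => y))
    (hb : b ∈ PySem.List.sorted (l.filter (fun c => decide (sortRank c = j))) (fun y => y)) :
    sortKey a ≤ sortKey b := by
  have hra := rank_of_mem_bucket l i a ha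
  have hrb := rank_of_mem_bucket l j b hb
  rw [sortKey, sortKey, Prod.Lex.le_iff]
  exact Or.inl (show sortRank a < sortRank b by rw [hra, hrb]; exact hij)

-- the whole concatenation is pairwise ≤ in the combined key
theorem concat_pairwise (l : List String) :
    List.Pairwise (fun a b => sortKey a ≤ sortKey b)
      (PySem.List.sorted (l.filter (fun c => decide (sortRank c = 0))) (fun y => y) ++
       PySem.List.sorted (l.filter (fun c => decide (sortRank c = 1))) (fun y => y) ++
       PySem.List.sorted (l.filter (fun c => decide (sortRank c = 2))) (fun y => y) ++
       PySem.List.sorted (l.filter (fun c => decide (sortRank c = 3))) (fun y => y)) := by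
  rw [List.append_assoc, List.append_assoc, List.pairwise_append]
  refine ⟨bucket_pairwise l 0, ?_, ?_⟩
  · rw [List.pairwise_append]
    refine ⟨bucket_pairwise l 1, ?_, ?_⟩
    · rw [List.pairwise_append]
      exact ⟨bucket_pairwise l 2, bucket_pairwise l 3,
        fun a ha b hb => cross_key_le l 2 3 (by norm_num) a b ha hb⟩
    · intro a ha b hb
      rcases List.mem_append.mp hb with hb | hb
      · exact cross_key_le l 1 2 (by norm_num) a b ha hb
      · exact cross_key_le l 1 3 (by norm_num) a b ha hb
  · intro a ha b hb
    rcases List.mem_append.mp hb with hb | hb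
    · exact cross_key_le l 0 1 (by norm_num) a b ha hb
    · rcases List.mem_append.mp hb with hb | hb
      · exact cross_key_le l 0 2 (by norm_num) a b ha hb
      · exact cross_key_le l 0 3 (by norm_num) a b ha hb

-- ===== VERDICT (by name: the statement is the Claim_ definition above) =====
theorem sort_controls_spec : Claim_equal_sort_controls := by
  intro s _
  unfold Spec_sort_controls
  show (let control_list := (PySem.Str.split? s ",").getD []
        let st := control_list.foldl sortControlsStep ([], [], [], [])
        PySem.List.sorted st.1 (fun x => x) ++ PySem.List.sorted st.2.1 (fun x => x) ++
          PySem.List.sorted st.2.2.1 (fun x => x) ++ PySem.List.sorted st.2.2.2 (fun x => x)) =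
       PySem.List.sorted2 (((PySem.Str.split? s ",").getD []).filter (fun c => decide (0 ≤ sortRank c))) sortRank (fun c => c)
  simp only []
  rw [foldl_buckets]
  simp only [List.nil_append]
  rw [sorted2_eq_sorted_key]
  set l := (PySem.Str.split? s ",").getD [] with hl
  have hperm :
      (PySem.List.sorted (l.filter (fun c => decide (sortRank c = 0))) (fun y => y) ++
       PySem.List.sorted (l.filter (fun c => decide (sortRank c = 1))) (fun y => y) ++
       PySem.List.sorted (l.filter (fun c => decide (sortRank c = 2))) (fun y => y) ++
       PySem.List.sorted (l.filter (fun c => decide (sortRank c = 3))) (fun y => y)).Perm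
        (PySem.List.sorted (l.filter (fun c => decide (0 ≤ sortRank c))) sortKey false) := by
    refine List.Perm.trans ?_ (PySem.List.sorted_perm _ sortKey false).symm
    refine List.Perm.trans ?_ (buckets_perm l)
    exact List.Perm.append (List.Perm.append (List.Perm.append
      (PySem.List.sorted_perm _ _ false) (PySem.List.sorted_perm _ _ false))
      (PySem.List.sorted_perm _ _ false)) (PySem.List.sorted_perm _ _ false)
  exact PySem.List.eq_of_perm_of_pairwise_le_of_injective sortKey sortKey_injective
    hperm (concat_pairwise l) (PySem.List.sorted_pairwise _ sortKey)
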